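-- pv_equiv track=rewrite | github.com/urikreitner/RWs | loop_erased_walk.py | loop_erased_random_walk
-- ===== SOURCE A (Python) =====
-- def loop_erased_random_walk(x_positions, y_positions):
--     """
--     Perform loop erasure on a random walk path.
--
--     Args:
--         x_positions: List of x coordinates of the walk
--         y_positions: List of y coordinates of the walk
--
--     Returns:
--         Tuple of (erased_x, erased_y) with loops removed
--     """
--     if len(x_positions) != len(y_positions):
--         raise ValueError("x_positions and y_positions must have the same length")
--
--     # Create list of (x, y) positions
--     positions = list(zip(x_positions, y_positions))
--
--     # Keep track of visited positions and their first occurrence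
--     visited = {}
--     erased_path = []
--
--     for i, pos in enumerate(positions):
--         if pos in visited:
--             # Found a loop - erase everything between first occurrence and now
--             first_occurrence = visited[pos]
--             # Keep path up to first occurrence, then continue from current position
--             erased_path = erased_path[:first_occurrence + 1]
--             # Update visited dict to only include positions before the loop
--             visited = {p: j for j, p in enumerate(erased_path)}
--         else:
--             # New position - add to path
--             visited[pos] = len(erased_path)
--             erased_path.append(pos)
--
--     # Separate x and y coordinates
--     if erased_path:
--         erased_x, erased_y = zip(*erased_path)
--         return list(erased_x), list(erased_y)
--     else:
--         return [], []
-- ===== SOURCE B (Python) =====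
-- def loop_erased_random_walk(x_positions, y_positions):
--     """Loop-erase a 2D walk in one O(n) pass: on revisiting a position, pop the
--     stack back to its first occurrence, deleting only popped entries from the dict."""
--     if len(x_positions) != len(y_positions):
--         raise ValueError("x_positions and y_positions must have the same length")
--     path = []
--     visited = {}
--     for pos in zip(x_positions, y_positions):
--         if pos in visited:
--             keep = visited[pos]
--             while len(path) - 1 > keep:
--                 del visited[path.pop()]
--         else:
--             visited[pos] = len(path)
--             path.append(pos)
--     return [p[0] for p in path], [p[1] for p in path]
-- ===== Notes on version B (the rewrite author's own statement) =====
-- stated objective: faster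
-- what changed: Replaces A's erase step (slice the path and rebuild the whole visited dict from scratch on every loop closure, O(n^2) worst case) with a stack that pops back to the first occurrence, deleting only the popped entries from the dict, giving one amortized O(n) pass.
-- outside the precondition, e.g. on loop_erased_random_walk([0], [0, 1]): A raises ValueError, B raises ValueError
import Mathlib
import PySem

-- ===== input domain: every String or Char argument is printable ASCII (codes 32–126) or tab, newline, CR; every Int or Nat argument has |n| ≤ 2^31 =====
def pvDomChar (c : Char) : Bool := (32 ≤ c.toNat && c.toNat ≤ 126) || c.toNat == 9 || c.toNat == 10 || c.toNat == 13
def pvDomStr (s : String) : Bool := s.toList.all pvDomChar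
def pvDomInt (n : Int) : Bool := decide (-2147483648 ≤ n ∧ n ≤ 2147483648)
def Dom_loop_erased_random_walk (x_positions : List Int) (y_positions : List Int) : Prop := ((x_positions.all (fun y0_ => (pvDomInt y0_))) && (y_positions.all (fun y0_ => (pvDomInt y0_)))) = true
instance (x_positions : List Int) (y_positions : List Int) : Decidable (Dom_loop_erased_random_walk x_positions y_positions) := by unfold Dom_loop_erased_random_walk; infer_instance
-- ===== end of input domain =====

-- B replaces A's slice-and-rebuild-the-dict loop erasure by a stack that pops back to the
-- first occurrence, deleting only the popped entries from the dict (objective: faster).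

-- ===== PORT A =====
-- visited = {p: j for j, p in enumerate(erased_path)}
def lewRebuild (path : List (Int × Int)) : PySem.Dict (Int × Int) Int :=
  (PySem.List.enumerate path 0).foldl (fun d jp => d.insert jp.2 jp.1) PySem.Dict.empty

-- the body of A's `for i, pos in enumerate(positions)` loop (state = (visited, erased_path))
def lewStepA (st : PySem.Dict (Int × Int) Int × List (Int × Int)) (pos : Int × Int) :
    PySem.Dict (Int × Int) Int × List (Int × Int) :=
  match st.1.get? pos with
  | some first =>
      let newPath := PySem.List.slice st.2 none (some (first + 1))
      (lewRebuild newPath, newPath)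
  | none => (st.1.insert pos ((st.2.length : Int)), st.2 ++ [pos])

def loop_erased_random_walk (x_positions : List Int) (y_positions : List Int) : List Int × List Int :=
  let positions := x_positions.zip y_positions
  let st := (PySem.List.enumerate positions 0).foldl (fun s ip => lewStepA s ip.2)
              (PySem.Dict.empty, ([] : List (Int × Int)))
  if st.2.isEmpty then ([], [])
  else (st.2.map Prod.fst, st.2.map Prod.snd)

-- ===== PORT B =====
-- `while len(path) - 1 > keep: del visited[path.pop()]`; the stack's top is the list head
def lewPop (visited : PySem.Dict (Int × Int) Int) (rpath : List (Int × Int)) (keep : Int) :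
    PySem.Dict (Int × Int) Int × List (Int × Int) :=
  match rpath with
  | [] => (visited, [])
  | p :: rest =>
      if ((p :: rest).length : Int) - 1 > keep then lewPop (visited.erase p) rest keep
      else (visited, p :: rest)

-- the body of B's `for pos in zip(...)` loop (state = (visited, path-as-stack), head = top)
def lewStepB (st : PySem.Dict (Int × Int) Int × List (Int × Int)) (pos : Int × Int) :
    PySem.Dict (Int × Int) Int × List (Int × Int) :=
  match st.1.get? pos with
  | some keep => lewPop st.1 st.2 keep
  | none => (st.1.insert pos ((st.2.length : Int)), pos :: st.2)

def loop_erased_random_walk_alt (x_positions : List Int) (y_positions : List Int) : List Int × List Int :=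
  let st := (x_positions.zip y_positions).foldl lewStepB (PySem.Dict.empty, ([] : List (Int × Int)))
  ((st.2.reverse).map Prod.fst, (st.2.reverse).map Prod.snd)

-- ===== PRECONDITION & SPEC =====
-- A raises ValueError iff the two coordinate lists have different lengths; Pre_ excludes exactly that.
def Pre_loop_erased_random_walk (x_positions : List Int) (y_positions : List Int) : Prop :=
  x_positions.length = y_positions.length
instance (x_positions : List Int) (y_positions : List Int) : Decidable (Pre_loop_erased_random_walk x_positions y_positions) := by unfold Pre_loop_erased_random_walk; infer_instance

def pvWitness_loop_erased_random_walk : List Int × List Int := ([0, 1, 1, 0, 2], [0, 0, 1, 0, 0])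

def Spec_loop_erased_random_walk (x_positions : List Int) (y_positions : List Int) (out : List Int × List Int) : Prop := out = loop_erased_random_walk_alt x_positions y_positions
instance (x_positions : List Int) (y_positions : List Int) (out : List Int × List Int) : Decidable (Spec_loop_erased_random_walk x_positions y_positions out) := by unfold Spec_loop_erased_random_walk; infer_instance

-- ===== CLAIM (what is proved, stated in full; the proofs are below) =====
def Claim_equal_loop_erased_random_walk : Prop := ∀ (x_positions : List Int) (y_positions : List Int), Dom_loop_erased_random_walk x_positions y_positions → Pre_loop_erased_random_walk x_positions y_positions → Spec_loop_erased_random_walk x_positions y_positions (loop_erased_random_walk x_positions y_positions)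

-- ===== LEMMAS AND PROOFS =====

-- index of the first occurrence of q (proof-side characterisation of both programs' dicts)
def fidx : List (Int × Int) → (Int × Int) → Option Nat
  | [], _ => none
  | p :: rest, q => if q = p then some 0 else (fidx rest q).map (· + 1)

lemma fidx_eq_none_iff (l : List (Int × Int)) (q : Int × Int) : fidx l q = none ↔ q ∉ l := by
  induction l with
  | nil => simp [fidx]
  | cons p rest ih => by_cases h : q = p <;> simp [fidx, h, ih]

lemma fidx_lt_length (l : List (Int × Int)) (q : Int × Int) (n : Nat) (h : fidx l q = some n) :
    n < l.length := by
  induction l generalizing n with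
  | nil => simp [fidx] at h
  | cons p rest ih =>
      by_cases hq : q = p
      · simp [fidx, hq] at h; simp; omega
      · simp only [fidx, if_neg hq, Option.map_eq_some_iff] at h
        obtain ⟨m, hm, rfl⟩ := h
        have := ih m hm
        simp; omega

lemma fidx_append_singleton_ne (l : List (Int × Int)) (p q : Int × Int) (h : q ≠ p) :
    fidx (l ++ [p]) q = fidx l q := by
  induction l with
  | nil => simp [fidx, h]
  | cons a rest ih => by_cases hq : q = a <;> simp [fidx, hq, ih]

lemma fidx_append_singleton_self (l : List (Int × Int)) (p : Int × Int) (h : p ∉ l) :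
    fidx (l ++ [p]) p = some l.length := by
  induction l with
  | nil => simp [fidx]
  | cons a rest ih =>
      have hpa : p ≠ a := by rintro rfl; simp at h
      simp [fidx, hpa, ih (by simp at h; exact h.2)]

-- general facts about Dict.erase lookups (no library lemma covers get? after erase)
lemma get?_erase_self {κ ν : Type} [BEq κ] [LawfulBEq κ] (d : PySem.Dict κ ν) (k : κ) :
    (d.erase k).get? k = none := by
  obtain ⟨items⟩ := d
  simp only [PySem.Dict.erase, PySem.Dict.get?, List.find?_filter]
  rw [List.find?_eq_none.2]
  · rfl
  · intro x _; simp

lemma get?_erase_of_ne {κ ν : Type} [BEq κ] [LawfulBEq κ] (d : PySem.Dict κ ν) (k q : κ)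
    (h : q ≠ k) : (d.erase k).get? q = d.get? q := by
  obtain ⟨items⟩ := d
  simp only [PySem.Dict.erase, PySem.Dict.get?, List.find?_filter]
  have hp : (fun (a : κ × ν) => decide ((!(a.1 == k)) = true ∧ (a.1 == q) = true))
      = (fun (a : κ × ν) => a.1 == q) := by
    funext a
    by_cases ha : a.1 = q
    · simp [ha, h]
    · simp [ha]
  rw [hp]

-- the dict A rebuilds on every loop closure is exactly first-occurrence-index lookup
lemma rebuild_get?_aux (path : List (Int × Int)) : ∀ (s : Int) (d : PySem.Dict (Int × Int) Int)
    (q : Int × Int), path.Nodup →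
    ((PySem.List.enumerate path s).foldl (fun d jp => d.insert jp.2 jp.1) d).get? q
      = match fidx path q with
        | some m => some (s + m)
        | none => d.get? q := by
  induction path with
  | nil => intro s d q _; simp [PySem.List.enumerate_nil, fidx]
  | cons p rest ih =>
      intro s d q hnd
      rw [PySem.List.enumerate_cons]
      simp only [List.foldl_cons]
      rw [ih (s + 1) (d.insert p s) q (by simp at hnd; exact hnd.2)]
      by_cases hq : q = p
      · subst hq
        have h0 : fidx rest q = none := (fidx_eq_none_iff _ _).2 (by simp at hnd; exact hnd.1)
        simp [fidx, h0, PySem.Dict.get?_insert_self]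
      · simp only [fidx, if_neg hq]
        cases h : fidx rest q with
        | none => simp [PySem.Dict.get?_insert, hq]
        | some m => simp; ring
      
lemma rebuild_inv (path : List (Int × Int)) (hnd : path.Nodup) (q : Int × Int) :
    (lewRebuild path).get? q = (fidx path q).map (fun n => (n : Int)) := by
  unfold lewRebuild
  rw [rebuild_get?_aux path 0 PySem.Dict.empty q hnd]
  cases h : fidx path q <;> simp [PySem.Dict.get?_empty]

-- B's pop loop drops the stack down to length keep+1 and keeps every lookup in sync
lemma lewPop_spec (rpath : List (Int × Int)) : ∀ (v : PySem.Dict (Int × Int) Int) (n : Nat),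
    (∀ q, v.get? q = (fidx rpath.reverse q).map (fun m => (m : Int))) →
    rpath.Nodup → n < rpath.length →
    (lewPop v rpath (n : Int)).2 = rpath.drop (rpath.length - (n + 1)) ∧
    ∀ q, ((lewPop v rpath (n : Int)).1).get? q
          = (fidx ((lewPop v rpath (n : Int)).2).reverse q).map (fun m => (m : Int)) := by
  induction rpath with
  | nil => intro v n _ _ h; simp at h
  | cons p rest ih =>
      intro v n hinv hnd hlt
      by_cases hc : ((p :: rest).length : Int) - 1 > (n : Int)
      · have hn : n < rest.length := by simp at hc; omega
        have hinv' : ∀ q, (v.erase p).get? q = (fidx rest.reverse q).map (fun m => (m : Int)) := by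
          intro q
          by_cases hq : q = p
          · subst hq
            rw [get?_erase_self]
            have hpr : q ∉ rest.reverse := by simp at hnd ⊢; exact hnd.1
            rw [(fidx_eq_none_iff _ _).2 hpr]; rfl
          · rw [get?_erase_of_ne v p q hq, hinv q]
            have hrev : (p :: rest).reverse = rest.reverse ++ [p] := by simp
            rw [hrev, fidx_append_singleton_ne _ _ _ hq]
        have hrec := ih (v.erase p) n hinv' hnd.of_cons hn
        have hstep : lewPop v (p :: rest) (n : Int) = lewPop (v.erase p) rest (n : Int) := by
          rw [lewPop, if_pos hc]
        rw [hstep]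
        refine ⟨?_, hrec.2⟩
        rw [hrec.1]
        have hlen : (p :: rest).length - (n + 1) = (rest.length - (n + 1)) + 1 := by
          simp; omega
        rw [hlen, List.drop_succ_cons]
      · have hstep : lewPop v (p :: rest) (n : Int) = (v, p :: rest) := by
          rw [lewPop, if_neg hc]
        have hn : n = rest.length := by simp at hc hlt; omega
        rw [hstep]
        exact ⟨by simp [hn], hinv⟩

-- the simulation relation between A's loop state and B's
def lewR (stA stB : PySem.Dict (Int × Int) Int × List (Int × Int)) : Prop :=
  stA.2 = stB.2.reverse ∧ stB.2.Nodup ∧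
  (∀ q, stA.1.get? q = (fidx stA.2 q).map (fun n => (n : Int))) ∧
  (∀ q, stB.1.get? q = (fidx stA.2 q).map (fun n => (n : Int)))

lemma step_R (stA stB : PySem.Dict (Int × Int) Int × List (Int × Int)) (pos : Int × Int)
    (h : lewR stA stB) : lewR (lewStepA stA pos) (lewStepB stB pos) := by
  obtain ⟨hpath, hnd, hIA, hIB⟩ := h
  have hndA : stA.2.Nodup := by rw [hpath]; exact List.nodup_reverse.mpr hnd
  cases hf : fidx stA.2 pos with
  | none =>
      have hA : stA.1.get? pos = none := by rw [hIA, hf]; rfl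
      have hB : stB.1.get? pos = none := by rw [hIB, hf]; rfl
      have hpos : pos ∉ stA.2 := (fidx_eq_none_iff _ _).1 hf
      have hlen : stA.2.length = stB.2.length := by rw [hpath]; simp
      simp only [lewStepA, lewStepB, hA, hB]
      refine ⟨by simp [hpath], ?_, ?_, ?_⟩
      · exact List.Nodup.cons (by rw [hpath] at hpos; simpa using hpos) hnd
      · intro q
        rw [PySem.Dict.get?_insert]
        by_cases hq : q = pos
        · subst hq
          rw [if_pos rfl, fidx_append_singleton_self _ _ hpos]; rfl
        · rw [if_neg hq, fidx_append_singleton_ne _ _ _ hq, hIA]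
      · intro q
        rw [PySem.Dict.get?_insert]
        by_cases hq : q = pos
        · subst hq
          rw [if_pos rfl, fidx_append_singleton_self _ _ hpos, hlen]; rfl
        · rw [if_neg hq, fidx_append_singleton_ne _ _ _ hq, hIB]
  | some m =>
      have hA : stA.1.get? pos = some (m : Int) := by rw [hIA, hf]; rfl
      have hB : stB.1.get? pos = some (m : Int) := by rw [hIB, hf]; rfl
      have hm : m < stA.2.length := fidx_lt_length _ _ _ hf
      have hlen : stA.2.length = stB.2.length := by rw [hpath]; simp
      have hslice : PySem.List.slice stA.2 none (some ((m : Int) + 1)) = stA.2.take (m + 1) := by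
        have h1 : ((m : Int) + 1).toNat = m + 1 := by omega
        rw [PySem.List.slice_to _ (by omega), h1]
      have hpop := lewPop_spec stB.2 stB.1 m (by rw [hpath] at hIB; exact hIB) hnd (hlen ▸ hm)
      have hrev : ((lewPop stB.1 stB.2 (m : Int)).2).reverse = stA.2.take (m + 1) := by
        rw [hpop.1, List.reverse_drop, ← hpath]
        congr 1
        omega
      simp only [lewStepA, lewStepB, hA, hB]
      refine ⟨?_, ?_, ?_, ?_⟩
      · simp only [hslice, hrev]
      · rw [hpop.1]; exact (List.drop_sublist _ _).nodup hnd
      · intro q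
        simp only [hslice]
        exact rebuild_inv _ ((List.take_sublist _ _).nodup hndA) q
      · intro q
        simp only [hslice, ← hrev]
        exact hpop.2 q

lemma fold_R (positions : List (Int × Int)) :
    ∀ stA stB, lewR stA stB →
      lewR (positions.foldl lewStepA stA) (positions.foldl lewStepB stB) := by
  induction positions with
  | nil => intro stA stB h; exact h
  | cons pos rest ih =>
      intro stA stB h
      simp only [List.foldl_cons]
      exact ih _ _ (step_R stA stB pos h)

lemma init_R : lewR (PySem.Dict.empty, ([] : List (Int × Int)))
    (PySem.Dict.empty, ([] : List (Int × Int))) := by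
  refine ⟨rfl, List.nodup_nil, ?_, ?_⟩ <;> intro q <;> simp [PySem.Dict.get?_empty, fidx]

-- ===== VERDICT (by name: the statement is the Claim_ definition above) =====
theorem loop_erased_random_walk_spec : Claim_equal_loop_erased_random_walk := by
  intro x y _ _
  unfold Spec_loop_erased_random_walk loop_erased_random_walk loop_erased_random_walk_alt
  have hfold : (PySem.List.enumerate (x.zip y) 0).foldl (fun s ip => lewStepA s ip.2)
        (PySem.Dict.empty, ([] : List (Int × Int)))
      = (x.zip y).foldl lewStepA (PySem.Dict.empty, ([] : List (Int × Int))) := by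
    conv_rhs => rw [← PySem.List.map_snd_enumerate (x.zip y) 0]
    rw [List.foldl_map]
  simp only [hfold]
  have hR := fold_R (x.zip y) _ _ init_R
  set stA := (x.zip y).foldl lewStepA (PySem.Dict.empty, ([] : List (Int × Int))) with hA
  set stB := (x.zip y).foldl lewStepB (PySem.Dict.empty, ([] : List (Int × Int))) with hB
  have hpath : stA.2 = stB.2.reverse := hR.1
  rw [hpath]
  by_cases he : stB.2.reverse.isEmpty
  · rw [if_pos he]
    rw [List.isEmpty_iff] at he
    simp [he]
  · rw [if_neg he]
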